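-- pv_equiv track=rewrite | github.com/gounpyeon/Reflection_in_NER | adapters.py | _normalize_suffix_bio_fast
-- ===== SOURCE A (Python) =====
-- def _normalize_suffix_bio_fast(tags):
--     out = []
--     for t in tags:
--         if t == "O":
--             out.append("O"); continue
--         if "_" in t:
--             ent, bio = t.rsplit("_", 1)
--             if bio in ("B","I","E","S"):
--                 out.append(f"{bio}-{ent}")
--                 continue
--         out.append(t)
--     return out
-- ===== SOURCE B (Python) =====
-- def _norm_one(t):
--     n = len(t)
--     if n >= 2 and t[n - 2] == "_" and t[n - 1] in "BIES":
--         return t[n - 1] + "-" + t[:n - 2]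
--     return t
--
-- def _normalize_suffix_bio_fast(tags):
--     table = {}
--     for t in tags:
--         if t not in table:
--             table[t] = _norm_one(t)
--     return [table[t] for t in tags]
-- ===== Notes on version B (the rewrite author's own statement) =====
-- stated objective: alternative
-- what changed: B runs two staged passes: it first builds a memo dict mapping each DISTINCT tag to its normalized form (decided by inspecting the last two characters directly, not by rsplitting at the last underscore), then emits the output purely by table lookup, so normalization work is done once per distinct tag instead of once per occurrence.
import Mathlib
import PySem

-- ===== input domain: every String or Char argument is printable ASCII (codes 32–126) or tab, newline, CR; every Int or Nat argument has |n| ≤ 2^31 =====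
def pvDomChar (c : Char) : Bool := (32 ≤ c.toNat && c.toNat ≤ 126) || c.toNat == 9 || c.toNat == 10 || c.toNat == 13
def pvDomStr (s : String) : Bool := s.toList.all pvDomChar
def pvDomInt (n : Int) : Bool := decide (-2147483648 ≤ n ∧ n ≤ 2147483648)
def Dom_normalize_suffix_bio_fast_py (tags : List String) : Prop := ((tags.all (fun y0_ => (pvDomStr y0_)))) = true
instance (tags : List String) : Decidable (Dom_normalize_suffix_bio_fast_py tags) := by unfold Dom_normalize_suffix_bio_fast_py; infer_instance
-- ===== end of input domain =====

-- B is an alternative two-stage implementation: first pass builds a memo dict mapping each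
-- distinct tag to its normalized form (decided by inspecting the last two characters, not by
-- rsplitting at the last underscore), second pass emits the output by table lookup. No speed claim.

-- ===== PORT A =====
-- t.rsplit("_", 1) when "_" in t: returns (part before last '_', part after last '_').
-- Hand-ported (PySem has no rsplit): none exactly when '_' does not occur.
def pvRsplitUnd (cs : List Char) : Option (List Char × List Char) :=
  match cs with
  | [] => none
  | c :: rest =>
    match pvRsplitUnd rest with
    | some (e, b) => some (c :: e, b)
    | none => if c = '_' then some ([], rest) else none

def pvATag (t : String) : String :=
  if t = "O" then "O"
  else if PySem.Str.isIn "_" t then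
    match pvRsplitUnd t.toList with
    | some (ent, bio) =>
        if bio = ['B'] ∨ bio = ['I'] ∨ bio = ['E'] ∨ bio = ['S'] then
          String.ofList (bio ++ '-' :: ent)   -- f"{bio}-{ent}"
        else t
    | none => t
  else t

def normalize_suffix_bio_fast_py (tags : List String) : List String :=
  tags.foldl (fun out t => out ++ [pvATag t]) []

-- ===== PORT B =====
-- _norm_one(t): n = len(t); if n >= 2 and t[n-2] == "_" and t[n-1] in "BIES":
--   return t[n-1] + "-" + t[:n-2]; return t
-- (t[n-1]/t[n-2] via pyGetD: the guard 2 ≤ n makes the default unreachable;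
--  t[n-1] in "BIES" is membership of a one-char string, exactly char membership)
def pvNormOne (t : String) : String :=
  let cs := t.toList
  let n : Int := cs.length
  if 2 ≤ n ∧ PySem.List.pyGetD cs (n - 2) ' ' = '_' ∧
     PySem.List.pyGetD cs (n - 1) ' ' ∈ ['B', 'I', 'E', 'S'] then
    String.ofList (PySem.List.pyGetD cs (n - 1) ' ' :: '-' ::
      PySem.List.slice cs none (some (n - 2)))
  else t

-- table = {}; for t in tags: if t not in table: table[t] = _norm_one(t)
-- return [table[t] for t in tags]   -- table[t]: key always present, default "" unreachable
def normalize_suffix_bio_fast_py_alt (tags : List String) : List String :=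
  let table := tags.foldl
    (fun table t =>
      if PySem.Dict.contains table t = false then PySem.Dict.insert table t (pvNormOne t)
      else table)
    PySem.Dict.empty
  tags.map (fun t => PySem.Dict.getD table t "")

-- ===== PRECONDITION & SPEC =====
def Spec_normalize_suffix_bio_fast_py (tags : List String) (out : List String) : Prop := out = normalize_suffix_bio_fast_py_alt tags
instance (tags : List String) (out : List String) : Decidable (Spec_normalize_suffix_bio_fast_py tags out) := by unfold Spec_normalize_suffix_bio_fast_py; infer_instance

-- ===== CLAIM (what is proved, stated in full; the proofs are below) =====
def Claim_equal_normalize_suffix_bio_fast_py : Prop := ∀ (tags : List String), Dom_normalize_suffix_bio_fast_py tags → Spec_normalize_suffix_bio_fast_py tags (normalize_suffix_bio_fast_py tags)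

-- ===== LEMMAS AND PROOFS =====

-- Characterisation of the hand-ported rsplit: none ↔ no '_', some (e,b) splits at the LAST '_'.
theorem pvRsplitUnd_spec (cs : List Char) :
    (pvRsplitUnd cs = none → '_' ∉ cs) ∧
    (∀ e b, pvRsplitUnd cs = some (e, b) → cs = e ++ '_' :: b ∧ '_' ∉ b) := by
  induction cs with
  | nil => exact ⟨fun _ => by simp, fun e b h => by simp [pvRsplitUnd] at h⟩
  | cons c rest ih =>
    constructor
    · intro h
      simp only [pvRsplitUnd] at h
      cases hr : pvRsplitUnd rest with
      | some p => rw [hr] at h; cases p; simp at h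
      | none =>
        rw [hr] at h
        by_cases hc : c = '_'
        · simp [hc] at h
        · simp only [List.mem_cons]
          rintro (rfl | hm)
          · exact hc rfl
          · exact (ih.1 hr) hm
    · intro e b h
      simp only [pvRsplitUnd] at h
      cases hr : pvRsplitUnd rest with
      | some p =>
        obtain ⟨e', b'⟩ := p
        rw [hr] at h
        simp only [Option.some.injEq, Prod.mk.injEq] at h
        obtain ⟨he, hb2⟩ := h
        subst he; subst hb2
        obtain ⟨hsplit, hnb⟩ := ih.2 e' b' hr
        exact ⟨by rw [hsplit]; rfl, hnb⟩
      | none =>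
        rw [hr] at h
        by_cases hc : c = '_'
        · subst hc
          rw [if_pos rfl] at h
          injection h with h2
          injection h2 with he hb2
          subst he; subst hb2
          exact ⟨by simp, ih.1 hr⟩
        · simp [hc] at h

theorem pvRsplitUnd_isSome (cs : List Char) (h : '_' ∈ cs) : (pvRsplitUnd cs).isSome := by
  cases hr : pvRsplitUnd cs with
  | none => exact absurd h ((pvRsplitUnd_spec cs).1 hr)
  | some p => simp

-- splitting just before a trailing non-'_' char
theorem pvRsplitUnd_append (p : List Char) (x : Char) (hx : x ≠ '_') :
    pvRsplitUnd (p ++ ['_', x]) = some (p, [x]) := by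
  induction p with
  | nil => simp [pvRsplitUnd, hx]
  | cons c rest ih => simp [pvRsplitUnd, ih]

-- a list of length ≥ 2 is its front plus its last two elements
theorem pvDecomp (cs : List Char) (h : 2 ≤ cs.length) :
    cs = cs.take (cs.length - 2) ++ [cs[cs.length - 2], cs[cs.length - 1]] := by
  have hd : cs.drop (cs.length - 2) = [cs[cs.length - 2], cs[cs.length - 1]] := by
    apply List.ext_getElem (by simp; omega)
    intro i h1 h2
    simp only [List.length_cons, List.length_nil] at h2
    have hi : i = 0 ∨ i = 1 := by omega
    rcases hi with rfl | rfl
    · simp only [List.getElem_drop, List.getElem_cons_zero]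
      congr 1
    · simp only [List.getElem_drop, List.getElem_cons_succ, List.getElem_cons_zero]
      congr 1
      omega
  conv_lhs => rw [← List.take_append_drop (cs.length - 2) cs]
  rw [hd]

-- B's guard, spelt on toList with the Int arithmetic removed
theorem pvNormOne_eq_ite (t : String) :
    pvNormOne t =
      if h : 2 ≤ t.toList.length ∧
          (∀ (h2 : 2 ≤ t.toList.length), t.toList[t.toList.length - 2]'(by omega) = '_' ∧
            t.toList[t.toList.length - 1]'(by omega) ∈ (['B','I','E','S'] : List Char)) then
        String.ofList (t.toList[t.toList.length - 1]'(by omega) :: '-' ::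
          t.toList.take (t.toList.length - 2))
      else t := by
  unfold pvNormOne
  by_cases h2 : 2 ≤ t.toList.length
  · have e2 : ((t.toList.length : Int) - 2) = ((t.toList.length - 2 : Nat) : Int) := by omega
    have e1 : ((t.toList.length : Int) - 1) = ((t.toList.length - 1 : Nat) : Int) := by omega
    simp only [e2, e1, PySem.List.pyGetD_natCast, PySem.List.slice_to_natCast]
    have g2 : t.toList.getD (t.toList.length - 2) ' ' = t.toList[t.toList.length - 2]'(by omega) :=
      List.getD_eq_getElem _ _ (by omega)
    have g1 : t.toList.getD (t.toList.length - 1) ' ' = t.toList[t.toList.length - 1]'(by omega) :=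
      List.getD_eq_getElem _ _ (by omega)
    rw [g2, g1]
    by_cases hab : t.toList[t.toList.length - 2]'(by omega) = '_' ∧
        t.toList[t.toList.length - 1]'(by omega) ∈ (['B','I','E','S'] : List Char)
    · rw [if_pos ⟨by exact_mod_cast h2, hab.1, hab.2⟩, dif_pos ⟨h2, fun _ => hab⟩]
    · rw [if_neg (by rintro ⟨-, ha1, ha2⟩; exact hab ⟨ha1, ha2⟩),
         dif_neg (by rintro ⟨-, hf⟩; exact hab (hf h2))]
  · rw [if_neg (by rintro ⟨hc, -⟩; omega), dif_neg (by rintro ⟨hc, -⟩; omega)]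

-- per-tag agreement: A's rsplit rule returns the same tag as B's last-two-chars rule
theorem pvTag_eq (t : String) : pvATag t = pvNormOne t := by
  rw [pvNormOne_eq_ite]
  by_cases hu : '_' ∈ t.toList
  · -- A takes the rsplit branch (t ≠ "O" since "O" has no underscore)
    have htO : t ≠ "O" := by
      intro h; rw [h] at hu; exact absurd hu (by decide)
    have hin : PySem.Str.isIn "_" t = true := (PySem.Str.isIn_iff_infix _ _).2 (by
      obtain ⟨l, r, hl⟩ := List.mem_iff_append.1 hu
      exact ⟨l, r, by
        have h1 : "_".toList = ['_'] := by decide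
        rw [hl, h1]; simp⟩)
    obtain ⟨⟨e, b⟩, hr⟩ := Option.isSome_iff_exists.1 (pvRsplitUnd_isSome t.toList hu)
    obtain ⟨hsplit, hnb⟩ := (pvRsplitUnd_spec t.toList).2 e b hr
    unfold pvATag
    rw [if_neg htO, if_pos hin, hr]
    show (if b = ['B'] ∨ b = ['I'] ∨ b = ['E'] ∨ b = ['S'] then String.ofList (b ++ '-' :: e) else t) = _
    by_cases hb : b = ['B'] ∨ b = ['I'] ∨ b = ['E'] ∨ b = ['S']
    · rw [if_pos hb]
      obtain ⟨x, hxm, rfl⟩ : ∃ x, x ∈ ['B','I','E','S'] ∧ b = [x] := by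
        rcases hb with rfl | rfl | rfl | rfl <;> exact ⟨_, by simp, rfl⟩
      have hcs : t.toList = e ++ ['_', x] := by simpa using hsplit
      have hlen : t.toList.length = e.length + 2 := by rw [hcs]; simp
      have h2 : 2 ≤ t.toList.length := by omega
      have hg2 : t.toList[t.toList.length - 2]'(by omega) = '_' := by
        simp [hcs, List.getElem_append_right]
      have hg1 : t.toList[t.toList.length - 1]'(by omega) = x := by
        simp [hcs, List.getElem_append_right]
      rw [dif_pos ⟨h2, fun _ => ⟨hg2, by rw [hg1]; exact hxm⟩⟩]
      rw [hg1]
      have htk : t.toList.take (t.toList.length - 2) = e := by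
        rw [hlen, hcs]; simp
      rw [htk]; rfl
    · rw [if_neg hb]
      -- B's guard must fail: if it held, the last-underscore split would be (front, [x])
      rw [dif_neg ?neg]
      case neg =>
        rintro ⟨h2, hrest⟩
        obtain ⟨hg2, hg1⟩ := hrest h2
        have hx : t.toList[t.toList.length - 1]'(by omega) ≠ '_' := by
          intro h; rw [h] at hg1; revert hg1; decide
        have hdec := pvDecomp t.toList h2
        rw [hg2] at hdec
        have hsp : pvRsplitUnd t.toList =
            some (t.toList.take (t.toList.length - 2), [t.toList[t.toList.length - 1]'(by omega)]) := by
          conv_lhs => rw [hdec]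
          exact pvRsplitUnd_append _ _ hx
        rw [hsp] at hr
        simp only [Option.some.injEq, Prod.mk.injEq] at hr
        apply hb
        rw [← hr.2]
        simp only [List.cons.injEq, and_true]
        simpa using hg1
  · -- no underscore: both return t unchanged (including t = "O")
    have hA : pvATag t = t := by
      unfold pvATag
      by_cases htO : t = "O"
      · rw [htO]; rfl
      · have hin : PySem.Str.isIn "_" t = false := by
          cases he : PySem.Str.isIn "_" t with
          | false => rfl
          | true =>
            obtain ⟨l, r, hl⟩ := (PySem.Str.isIn_iff_infix _ _).1 he
            exact absurd (by rw [← hl]; simp : '_' ∈ t.toList) hu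
        rw [if_neg htO, if_neg (by rw [hin]; simp)]
    rw [hA, dif_neg ?neg]
    case neg =>
      rintro ⟨h2, hrest⟩
      exact hu ((hrest h2).1 ▸ List.getElem_mem _)

-- The memo table: after the build loop, every processed tag maps to its normalized form.
theorem pvBuild_get (tags : List String) (d : PySem.Dict String String)
    (hg : ∀ k v, d.get? k = some v → v = pvNormOne k) :
    ∀ t, (t ∈ tags ∨ (d.get? t).isSome) →
      (tags.foldl
        (fun table t =>
          if PySem.Dict.contains table t = false then PySem.Dict.insert table t (pvNormOne t)
          else table) d).get? t = some (pvNormOne t) := by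
  induction tags generalizing d with
  | nil =>
    intro t ht
    rcases ht with ht | ht
    · cases ht
    · obtain ⟨v, hv⟩ := Option.isSome_iff_exists.1 ht
      simp only [List.foldl_nil, hv, (hg t v hv).symm]
  | cons a rest ih =>
    intro t ht
    simp only [List.foldl_cons]
    set d' := if PySem.Dict.contains d a = false then PySem.Dict.insert d a (pvNormOne a) else d with hd'
    have hg' : ∀ k v, d'.get? k = some v → v = pvNormOne k := by
      intro k v hv
      rw [hd'] at hv
      split_ifs at hv with hc
      · rw [PySem.Dict.get?_insert] at hv
        split_ifs at hv with hk
        · subst hk; injection hv with hv; exact hv.symm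
        · exact hg k v hv
      · exact hg k v hv
    apply ih d' hg'
    rcases ht with ht | ht
    · rcases List.mem_cons.1 ht with rfl | hm
      · right
        rw [hd']
        split_ifs with hc
        · rw [PySem.Dict.get?_insert_self]; simp
        · rw [← PySem.Dict.contains_eq_isSome_get?]
          simpa using hc
      · exact Or.inl hm
    · right
      rw [hd']
      split_ifs with hc
      · by_cases hk : t = a
        · rw [hk, PySem.Dict.get?_insert_self]; simp
        · rw [PySem.Dict.get?_insert_of_ne _ _ hk]; exact ht
      · exact ht

-- ===== VERDICT (by name: the statement is the Claim_ definition above) =====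
theorem normalize_suffix_bio_fast_py_spec : Claim_equal_normalize_suffix_bio_fast_py := by
  intro tags _
  unfold Spec_normalize_suffix_bio_fast_py normalize_suffix_bio_fast_py normalize_suffix_bio_fast_py_alt
  rw [PySem.List.foldl_append_singleton_eq_map pvATag tags []]
  simp only []
  apply List.map_congr_left
  intro t hm
  rw [pvTag_eq t, PySem.Dict.getD_eq_get?_getD]
  rw [pvBuild_get tags PySem.Dict.empty (by intro k v hv; rw [PySem.Dict.get?_empty] at hv; cases hv)
        t (Or.inl hm)]
  rfl
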